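-- pv_equiv track=rewrite | github.com/surajit20072003/wan2gp-api | wan2gp_client.py | _extract_output_filename
-- ===== SOURCE A (Python) =====
-- from typing import Dict, Optional
--
-- def _extract_output_filename(stdout: str, stderr: str) -> Optional[str]:
--     """Extract output filename from generation logs."""
--     combined = stdout + stderr
--
--     for line in combined.split('\n'):
--         if 'saved video:' in line.lower() or 'output:' in line.lower():
--             if '.mp4' in line:
--                 parts = line.split('/')
--                 for part in reversed(parts):
--                     if '.mp4' in part:
--                         return part.strip()
--
--     for line in combined.split('\n'):
--         if '.mp4' in line:
--             words = line.split()
--             for word in words: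
--                 if '.mp4' in word:
--                     return word.strip().rstrip(',').rstrip('.')
--
--     return None
-- ===== SOURCE B (Python) =====
-- from typing import Optional
--
-- def _extract_output_filename(stdout: str, stderr: str) -> Optional[str]:
--     """Single pass over the lines, remembering the first fallback candidate."""
--     fallback = None
--     for line in (stdout + stderr).split('\n'):
--         if ('saved video:' in line.lower() or 'output:' in line.lower()) and '.mp4' in line:
--             hit = next((p for p in reversed(line.split('/')) if '.mp4' in p), None)
--             if hit is not None:
--                 return hit.strip()
--         if '.mp4' in line and fallback is None:
--             word = next((w for w in line.split() if '.mp4' in w), None)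
--             if word is not None:
--                 fallback = word.strip().rstrip(',').rstrip('.')
--     return fallback
-- ===== Notes on version B (the rewrite author's own statement) =====
-- stated objective: simpler
-- what changed: Replaced A's two full passes over the split lines by one traversal that returns on a primary ('saved video:'/'output:' + '.mp4') line and remembers the first pass-2 fallback candidate, returned after the loop.
import Mathlib
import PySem

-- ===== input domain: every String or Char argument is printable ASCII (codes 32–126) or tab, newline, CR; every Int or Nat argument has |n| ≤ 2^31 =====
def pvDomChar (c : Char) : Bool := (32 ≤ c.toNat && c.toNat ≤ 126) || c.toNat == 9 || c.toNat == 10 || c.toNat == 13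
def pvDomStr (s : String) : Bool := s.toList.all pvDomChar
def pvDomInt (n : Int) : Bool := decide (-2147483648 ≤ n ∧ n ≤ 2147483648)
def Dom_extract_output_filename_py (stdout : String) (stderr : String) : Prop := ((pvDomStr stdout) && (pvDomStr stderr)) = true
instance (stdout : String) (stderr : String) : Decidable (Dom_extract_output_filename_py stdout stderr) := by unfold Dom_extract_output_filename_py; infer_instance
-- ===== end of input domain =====

-- B collapses A's two ordered passes over the lines into one traversal with a remembered
-- fallback candidate; return values are proved equal on all inputs (no mutation involved).

-- shared line-level helpers (both Python versions contain these expressions verbatim)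
-- Python's s.rstrip(c) for a single strip character (exact: removes every trailing c;
-- PySem has no rstrip-with-chars form, so it is written out here)
def pvRstripChar (s : String) (c : Char) : String :=
  String.ofList ((s.toList.reverse.dropWhile (fun x => x == c)).reverse)

-- 'saved video:' in line.lower() or 'output:' in line.lower()
def pvKeyword (l : String) : Bool :=
  PySem.Str.isIn "saved video:" (PySem.Str.lower l) || PySem.Str.isIn "output:" (PySem.Str.lower l)

-- '.mp4' in s
def pvHasMp4 (s : String) : Bool := PySem.Str.isIn ".mp4" s

-- for part in reversed(line.split('/')): if '.mp4' in part: return part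
-- (the separator is the literal "/", never empty, so split? is some; getD [] totalizes)
def pvPartHit (l : String) : Option String :=
  ((PySem.Str.split? l "/").getD []).reverse.find? (fun p => pvHasMp4 p)

-- for word in line.split(): if '.mp4' in word: return word
def pvWordHit (l : String) : Option String :=
  (PySem.Str.split₀ l).find? (fun w => pvHasMp4 w)

-- word.strip().rstrip(',').rstrip('.')
def pvCleanWord (w : String) : String :=
  pvRstripChar (pvRstripChar (PySem.Str.strip w) ',') '.'

-- combined.split('\n')  (the separator is the literal "\n", so split? is some)
def pvLines (stdout : String) (stderr : String) : List String :=
  (PySem.Str.split? (String.ofList (stdout.toList ++ stderr.toList)) "\n").getD []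

-- ===== PORT A =====
-- pass 1: first keyword line with '.mp4' returns its last '/'-part containing '.mp4', stripped
def pvA_pass1 : List String → Option String
  | [] => none
  | l :: rest =>
    if pvKeyword l then
      if pvHasMp4 l then
        match pvPartHit l with
        | some p => some (PySem.Str.strip p)
        | none => pvA_pass1 rest
      else pvA_pass1 rest
    else pvA_pass1 rest

-- pass 2: first '.mp4' line returns its first '.mp4' word, cleaned
def pvA_pass2 : List String → Option String
  | [] => none
  | l :: rest =>
    if pvHasMp4 l then
      match pvWordHit l with
      | some w => some (pvCleanWord w)
      | none => pvA_pass2 rest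
    else pvA_pass2 rest

def extract_output_filename_py (stdout : String) (stderr : String) : Option String :=
  match pvA_pass1 (pvLines stdout stderr) with
  | some v => some v
  | none => pvA_pass2 (pvLines stdout stderr)

-- ===== PORT B =====
-- if '.mp4' in line and fallback is None: record the first '.mp4' word, cleaned
def pvB_step (l : String) (fb : Option String) : Option String :=
  if pvHasMp4 l && fb.isNone then
    match pvWordHit l with
    | some w => some (pvCleanWord w)
    | none => fb
  else fb

-- single pass: return on a primary hit, else carry the fallback; after the loop return it
def pvB_loop : List String → Option String → Option String
  | [], fb => fb
  | l :: rest, fb =>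
    if pvKeyword l && pvHasMp4 l then
      match pvPartHit l with
      | some p => some (PySem.Str.strip p)
      | none => pvB_loop rest (pvB_step l fb)
    else pvB_loop rest (pvB_step l fb)

def extract_output_filename_py_alt (stdout : String) (stderr : String) : Option String :=
  pvB_loop (pvLines stdout stderr) none

-- ===== PRECONDITION & SPEC =====
def Spec_extract_output_filename_py (stdout : String) (stderr : String) (out : Option String) : Prop := out = extract_output_filename_py_alt stdout stderr
instance (stdout : String) (stderr : String) (out : Option String) : Decidable (Spec_extract_output_filename_py stdout stderr out) := by unfold Spec_extract_output_filename_py; infer_instance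

-- ===== CLAIM (what is proved, stated in full; the proofs are below) =====
def Claim_equal_extract_output_filename_py : Prop := ∀ (stdout : String) (stderr : String), Dom_extract_output_filename_py stdout stderr → Spec_extract_output_filename_py stdout stderr (extract_output_filename_py stdout stderr)

-- ===== LEMMAS AND PROOFS =====

-- loop invariant: B's single pass equals pass 1, then the carried fallback, then pass 2
lemma pvB_loop_eq (lines : List String) : ∀ fb : Option String,
    pvB_loop lines fb =
      match pvA_pass1 lines with
      | some v => some v
      | none => match fb with
                | some x => some x
                | none => pvA_pass2 lines := by
  induction lines with
  | nil => intro fb; cases fb <;> rfl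
  | cons l rest ih =>
    intro fb
    rw [pvB_loop, pvA_pass1]
    cases hk : pvKeyword l with
    | true =>
      cases hm : pvHasMp4 l with
      | true =>
        cases hf : pvPartHit l with
        | some p => simp
        | none =>
          -- no '/'-part matched: both fall through; the line still feeds pass 2 / the fallback
          simp only [Bool.and_self, if_true]
          rw [ih, pvA_pass2]
          cases fb with
          | some x => simp [pvB_step, hm]
          | none =>
            simp only [hm, if_true]
            cases hw : pvWordHit l with
            | some w => simp [pvB_step, hm, hw]
            | none => simp [pvB_step, hm, hw]
      | false =>
        -- keyword but no '.mp4': skipped by pass 1 and by both fallback rules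
        simp only [Bool.and_false, Bool.false_eq_true, if_false]
        rw [ih, pvA_pass2]
        simp [pvB_step, hm]
    | false =>
      -- no keyword: pass 1 skips; the line may still set the fallback
      simp only [Bool.false_and, Bool.false_eq_true, if_false]
      rw [ih, pvA_pass2]
      cases fb with
      | some x => simp [pvB_step]
      | none =>
        cases hm : pvHasMp4 l with
        | true =>
          cases hw : pvWordHit l with
          | some w => simp [pvB_step, hm, hw]
          | none => simp [pvB_step, hm, hw]
        | false => simp [pvB_step, hm]

-- ===== VERDICT (by name: the statement is the Claim_ definition above) =====
theorem extract_output_filename_py_spec : Claim_equal_extract_output_filename_py := by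
  intro stdout stderr _
  unfold Spec_extract_output_filename_py extract_output_filename_py extract_output_filename_py_alt
  rw [pvB_loop_eq]
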